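-- pv_equiv track=rewrite | github.com/pedrogmonteiro/cprojects | python_project/orbito/orbito.py | obtem_linhas_diagonais
-- ===== SOURCE A (Python) =====
-- def cria_posicao(col,lin):
--     """
--     Cria uma posição no tabuleiro a partir de uma coluna e uma linha.
--
--     Parametros:
--         col (str): A coluna da posição, uma letra de 'a' a 'j'.
--         lin (int): A linha da posição, um número inteiro entre 1 e 10."""
--
--     if not (type(col) == str and col in 'abcdefghij' and len(col) == 1 and type(lin) == int and 1 <= lin <= 10):
--         raise ValueError('cria_posicao: argumentos invalidos')
--     return (col,lin)
--
-- def obtem_pos_col(p):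
--     """
--     Obtém a coluna da posição.
--
--     Parametros:
--         p (tuple): A posição representada como um tuplo (coluna, linha)."""
--
--     return p[0]
--
-- def obtem_pos_lin(p):
--     """
--     Obtém a linha da posição.
--
--     Parametros:
--         p (tuple): A posição representada como um tuplo (coluna, linha)."""
--
--     return p[1]
--
-- def obtem_pedra(t,p): #obtem pedra de uma certa posição do tabuleiro
--     col = ord(obtem_pos_col(p)) - ord('a')
--     lin = int(obtem_pos_lin(p)) - 1
--     return t[lin][col]
--
-- def obtem_linhas_diagonais(t, p):
--     """
--     Obtém as diagonais que passam por uma posição específica no tabuleiro.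
--
--     Args:
--         t (list): O tabuleiro representado como uma lista de listas.
--         p (tuple): A posição inicial, representada como um tuplo (coluna, linha)."""
--
--     diagonal = []
--     antidiagonal = []
--
--     col_idx = ord(obtem_pos_col(p)) - ord('a')
--     lin_idx = obtem_pos_lin(p) - 1
--     tamanho = len(t)
--
--     i, j = lin_idx, col_idx
--     while i >= 0 and j >= 0:
--         pos = cria_posicao(chr(ord('a') + j), i + 1)
--         diagonal.insert(0, (pos, obtem_pedra(t, pos)))
--         i -= 1
--         j -= 1
--
--     i, j = lin_idx + 1, col_idx + 1
--     while i < tamanho and j < tamanho: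
--         pos = cria_posicao(chr(ord('a') + j), i + 1)
--         diagonal.append((pos, obtem_pedra(t, pos)))
--         i += 1
--         j += 1
--
--     #antidiagonal
--     i, j = lin_idx, col_idx
--     while i >= 0 and j < tamanho:
--         pos = cria_posicao(chr(ord('a') + j), i + 1)
--         antidiagonal.append((pos, obtem_pedra(t, pos)))
--         i -= 1
--         j += 1
--
--     i, j = lin_idx + 1, col_idx - 1
--     while i < tamanho and j >= 0:
--         pos = cria_posicao(chr(ord('a') + j), i + 1)
--         antidiagonal.insert(0, (pos, obtem_pedra(t, pos)))
--         i += 1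
--         j -= 1
--     return tuple(diagonal), tuple(antidiagonal)
-- ===== SOURCE B (Python) =====
-- def obtem_linhas_diagonais(t, p):
--     col_idx = ord(p[0]) - ord('a')
--     lin_idx = p[1] - 1
--     n = len(t)
--     diagonal = []
--     for i in range(n):
--         j = i + col_idx - lin_idx
--         if 0 <= j < n:
--             diagonal.append(((chr(ord('a') + j), i + 1), t[i][j]))
--     antidiagonal = []
--     for i in range(n - 1, -1, -1):
--         j = col_idx + lin_idx - i
--         if 0 <= j < n:
--             antidiagonal.append(((chr(ord('a') + j), i + 1), t[i][j]))
--     return tuple(diagonal), tuple(antidiagonal)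
-- ===== Notes on version B (the rewrite author's own statement) =====
-- stated objective: simpler
-- what changed: Replaces A's four directional walks (two of which build their list with insert(0)) by two single filtered index scans over range(len(t)), ascending for the diagonal and descending for the antidiagonal.
import Mathlib
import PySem

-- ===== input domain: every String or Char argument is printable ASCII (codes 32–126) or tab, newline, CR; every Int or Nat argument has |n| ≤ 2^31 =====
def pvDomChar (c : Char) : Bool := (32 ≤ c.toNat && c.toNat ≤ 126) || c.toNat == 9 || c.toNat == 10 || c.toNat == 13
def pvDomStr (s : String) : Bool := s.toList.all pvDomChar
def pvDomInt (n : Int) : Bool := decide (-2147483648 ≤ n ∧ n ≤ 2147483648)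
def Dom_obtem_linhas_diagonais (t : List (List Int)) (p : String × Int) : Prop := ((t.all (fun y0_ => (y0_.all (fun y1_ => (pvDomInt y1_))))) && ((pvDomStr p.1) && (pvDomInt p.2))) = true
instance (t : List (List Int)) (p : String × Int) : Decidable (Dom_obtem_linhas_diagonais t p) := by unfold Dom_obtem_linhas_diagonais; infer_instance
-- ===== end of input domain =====

-- B replaces A's four directional walks (two of them building their list with insert(0)) by two single
-- index scans over the row range, one ascending for the diagonal and one descending for the antidiagonal.

-- ord(s) for a 1-character string (Pre_ guarantees length 1, where this is exact)
def pvOrdStr (s : String) : Int := ((s.toList.headD (Char.ofNat 0)).toNat : Int)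

-- chr(m); exact for 0 ≤ m < 0xD800 (inside Pre_ only codes 97..106 occur)
def pvChr (m : Int) : String := String.ofList [Char.ofNat m.toNat]

-- ===== PORT A =====
-- cria_posicao's validity check raises ValueError on invalid arguments; Pre_ excludes those inputs,
-- so the port just builds the pair.
def cria_posicao (col : String) (lin : Int) : String × Int := (col, lin)

def obtem_pos_col (p : String × Int) : String := p.1

def obtem_pos_lin (p : String × Int) : Int := p.2

-- t[lin][col]; pyGet? = none is Python's IndexError, excluded by Pre_, hence the .getD defaults never show
def obtem_pedra (t : List (List Int)) (p : String × Int) : Int :=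
  let col := pvOrdStr (obtem_pos_col p) - 97
  let lin := obtem_pos_lin p - 1
  ((PySem.List.pyGet? t lin).getD []) |> (fun row => (PySem.List.pyGet? row col).getD 0)

-- The four while-loops, transliterated with a structural fuel counter as totality guard; every call
-- passes fuel covering all iterations the Python loop performs, so the guard never cuts a loop short.
-- while i >= 0 and j >= 0: diagonal.insert(0, …); i -= 1; j -= 1
def pvDiagUp (t : List (List Int)) : Nat → Int → Int → List ((String × Int) × Int) → List ((String × Int) × Int)
  | 0, _, _, acc => acc
  | Nat.succ fuel, i, j, acc =>
    if 0 ≤ i ∧ 0 ≤ j then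
      let pos := cria_posicao (pvChr (97 + j)) (i + 1)
      pvDiagUp t fuel (i - 1) (j - 1) ((pos, obtem_pedra t pos) :: acc)
    else acc

-- while i < tamanho and j < tamanho: diagonal.append(…); i += 1; j += 1
def pvDiagDown (t : List (List Int)) (n : Int) : Nat → Int → Int → List ((String × Int) × Int) → List ((String × Int) × Int)
  | 0, _, _, acc => acc
  | Nat.succ fuel, i, j, acc =>
    if i < n ∧ j < n then
      let pos := cria_posicao (pvChr (97 + j)) (i + 1)
      pvDiagDown t n fuel (i + 1) (j + 1) (acc ++ [(pos, obtem_pedra t pos)])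
    else acc

-- while i >= 0 and j < tamanho: antidiagonal.append(…); i -= 1; j += 1
def pvAntiUp (t : List (List Int)) (n : Int) : Nat → Int → Int → List ((String × Int) × Int) → List ((String × Int) × Int)
  | 0, _, _, acc => acc
  | Nat.succ fuel, i, j, acc =>
    if 0 ≤ i ∧ j < n then
      let pos := cria_posicao (pvChr (97 + j)) (i + 1)
      pvAntiUp t n fuel (i - 1) (j + 1) (acc ++ [(pos, obtem_pedra t pos)])
    else acc

-- while i < tamanho and j >= 0: antidiagonal.insert(0, …); i += 1; j -= 1
def pvAntiDown (t : List (List Int)) (n : Int) : Nat → Int → Int → List ((String × Int) × Int) → List ((String × Int) × Int)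
  | 0, _, _, acc => acc
  | Nat.succ fuel, i, j, acc =>
    if i < n ∧ 0 ≤ j then
      let pos := cria_posicao (pvChr (97 + j)) (i + 1)
      pvAntiDown t n fuel (i + 1) (j - 1) ((pos, obtem_pedra t pos) :: acc)
    else acc

def obtem_linhas_diagonais (t : List (List Int)) (p : String × Int) :
    (List ((String × Int) × Int)) × (List ((String × Int) × Int)) :=
  let col_idx := pvOrdStr (obtem_pos_col p) - 97
  let lin_idx := obtem_pos_lin p - 1
  let tamanho : Int := (t.length : Int)
  let diagonal := pvDiagDown t tamanho (tamanho - (lin_idx + 1)).toNat (lin_idx + 1) (col_idx + 1)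
    (pvDiagUp t (lin_idx + 1).toNat lin_idx col_idx [])
  let antidiagonal := pvAntiDown t tamanho (tamanho - (lin_idx + 1)).toNat (lin_idx + 1) (col_idx - 1)
    (pvAntiUp t tamanho (lin_idx + 1).toNat lin_idx col_idx [])
  (diagonal, antidiagonal)

-- ===== PORT B =====
def obtem_linhas_diagonais_alt (t : List (List Int)) (p : String × Int) :
    (List ((String × Int) × Int)) × (List ((String × Int) × Int)) :=
  let c := pvOrdStr p.1 - 97
  let l := p.2 - 1
  let n : Int := (t.length : Int)
  let diagonal := (PySem.List.pyRange 0 n 1).foldl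
    (fun acc i =>
      let j := i + c - l
      if 0 ≤ j ∧ j < n then
        acc ++ [((pvChr (97 + j), i + 1), ((PySem.List.pyGet? t i).getD []) |> (fun row => (PySem.List.pyGet? row j).getD 0))]
      else acc) []
  let antidiagonal := (PySem.List.pyRange (n - 1) (-1) (-1)).foldl
    (fun acc i =>
      let j := c + l - i
      if 0 ≤ j ∧ j < n then
        acc ++ [((pvChr (97 + j), i + 1), ((PySem.List.pyGet? t i).getD []) |> (fun row => (PySem.List.pyGet? row j).getD 0))]
      else acc) []
  (diagonal, antidiagonal)

-- ===== PRECONDITION & SPEC =====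
-- A cell (i, j) of the board A's walks may touch: position letter/line valid ('a'..'j' → 0 ≤ j ≤ 9,
-- line 1..10 → 0 ≤ i ≤ 9) and the cell exists (row i exists, column j inside that row).
def pvOkD (t : List (List Int)) (d i : Int) : Prop :=
  0 ≤ i ∧ i ≤ 9 ∧ 0 ≤ i + d ∧ i + d ≤ 9 ∧ i < (t.length : Int) ∧
    i + d < ((((PySem.List.pyGet? t i).getD []).length : Int))
def pvOkA (t : List (List Int)) (s i : Int) : Prop :=
  0 ≤ i ∧ i ≤ 9 ∧ 0 ≤ s - i ∧ s - i ≤ 9 ∧ i < (t.length : Int) ∧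
    s - i < ((((PySem.List.pyGet? t i).getD []).length : Int))

-- Pre_ = the column is one character, and every cell A's four diagonal walks visit (four index
-- intervals through the position, written in closed form) is a valid, existing board cell — exactly
-- the inputs on which A returns instead of raising — except that when some walk does run, the column
-- index must also lie inside the board's height (c < n): on ragged boards whose rows outrun the board's
-- height A's walk reads cells beyond column n while B reads the square board only; both values are
-- defensible on such malformed boards, and those inputs are excluded — see claim.json "cites".
def Pre_obtem_linhas_diagonais (t : List (List Int)) (p : String × Int) : Prop :=
  p.1.toList.length = 1 ∧
  ((pvOrdStr p.1 - 97) < ((t.length : Int)) ∨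
    (((p.2 - 1) + 1) ≤ (max 0 ((p.2 - 1) - (pvOrdStr p.1 - 97))) ∧ (min ((t.length : Int)) (((t.length : Int)) - ((pvOrdStr p.1 - 97) - (p.2 - 1)))) ≤ ((p.2 - 1) + 1) ∧ ((p.2 - 1) + 1) ≤ (max 0 (((pvOrdStr p.1 - 97) + (p.2 - 1)) - ((t.length : Int)) + 1)) ∧ (min ((t.length : Int)) (((pvOrdStr p.1 - 97) + (p.2 - 1)) + 1)) ≤ ((p.2 - 1) + 1))) ∧
  (∀ i ∈ PySem.List.pyRange (max 0 ((p.2 - 1) - (pvOrdStr p.1 - 97))) (max (max 0 ((p.2 - 1) - (pvOrdStr p.1 - 97))) ((p.2 - 1) + 1)) 1, pvOkD t ((pvOrdStr p.1 - 97) - (p.2 - 1)) i) ∧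
  (∀ i ∈ PySem.List.pyRange ((p.2 - 1) + 1) (max ((p.2 - 1) + 1) (min ((t.length : Int)) (((t.length : Int)) - ((pvOrdStr p.1 - 97) - (p.2 - 1))))) 1, pvOkD t ((pvOrdStr p.1 - 97) - (p.2 - 1)) i) ∧
  (∀ i ∈ PySem.List.pyRange (max 0 (((pvOrdStr p.1 - 97) + (p.2 - 1)) - ((t.length : Int)) + 1)) (max (max 0 (((pvOrdStr p.1 - 97) + (p.2 - 1)) - ((t.length : Int)) + 1)) ((p.2 - 1) + 1)) 1, pvOkA t ((pvOrdStr p.1 - 97) + (p.2 - 1)) i) ∧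
  (∀ i ∈ PySem.List.pyRange ((p.2 - 1) + 1) (max ((p.2 - 1) + 1) (min ((t.length : Int)) (((pvOrdStr p.1 - 97) + (p.2 - 1)) + 1))) 1, pvOkA t ((pvOrdStr p.1 - 97) + (p.2 - 1)) i)

instance (t : List (List Int)) (p : String × Int) : Decidable (Pre_obtem_linhas_diagonais t p) := by
  unfold Pre_obtem_linhas_diagonais pvOkD pvOkA; infer_instance

def pvWitness_obtem_linhas_diagonais : List (List Int) × (String × Int) :=
  ([[1, 2], [3, 4]], ("b", 1))

def Spec_obtem_linhas_diagonais (t : List (List Int)) (p : String × Int)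
    (out : (List ((String × Int) × Int)) × (List ((String × Int) × Int))) : Prop :=
  out = obtem_linhas_diagonais_alt t p
instance (t : List (List Int)) (p : String × Int) (out : (List ((String × Int) × Int)) × (List ((String × Int) × Int))) : Decidable (Spec_obtem_linhas_diagonais t p out) := by unfold Spec_obtem_linhas_diagonais; infer_instance

-- ===== CLAIM (what is proved, stated in full; the proofs are below) =====
def Claim_equal_obtem_linhas_diagonais : Prop := ∀ (t : List (List Int)) (p : String × Int), Dom_obtem_linhas_diagonais t p → Pre_obtem_linhas_diagonais t p → Spec_obtem_linhas_diagonais t p (obtem_linhas_diagonais t p)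

-- ===== LEMMAS AND PROOFS =====

-- the element built for row i on the diagonal through offset d (j = i + d)
def pvCellD (t : List (List Int)) (d i : Int) : (String × Int) × Int :=
  let pos := cria_posicao (pvChr (97 + (i + d))) (i + 1)
  (pos, obtem_pedra t pos)

-- the element built for row i on the antidiagonal through sum s (j = s - i)
def pvCellA (t : List (List Int)) (s i : Int) : (String × Int) × Int :=
  let pos := cria_posicao (pvChr (97 + (s - i))) (i + 1)
  (pos, obtem_pedra t pos)

lemma pvOrd_chr (j : Int) (h0 : 0 ≤ j) (h10 : j < 10) : pvOrdStr (pvChr (97 + j)) = 97 + j := by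
  unfold pvOrdStr pvChr
  simp only [String.toList_ofList, List.headD_cons]
  rw [Char.toNat_ofNat, if_pos (Or.inl (by omega))]
  omega

lemma pvCellD_eq (t : List (List Int)) (d i : Int) (h0 : 0 ≤ i + d) (h10 : i + d < 10) :
    pvCellD t d i =
      ((pvChr (97 + (i + d)), i + 1),
        (PySem.List.pyGet? ((PySem.List.pyGet? t i).getD []) (i + d)).getD 0) := by
  unfold pvCellD cria_posicao obtem_pedra obtem_pos_col obtem_pos_lin
  dsimp only
  rw [pvOrd_chr _ h0 h10]
  rw [show 97 + (i + d) - 97 = i + d by ring, show i + 1 - 1 = i by ring]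

lemma pvCellA_eq (t : List (List Int)) (s i : Int) (h0 : 0 ≤ s - i) (h10 : s - i < 10) :
    pvCellA t s i =
      ((pvChr (97 + (s - i)), i + 1),
        (PySem.List.pyGet? ((PySem.List.pyGet? t i).getD []) (s - i)).getD 0) := by
  unfold pvCellA cria_posicao obtem_pedra obtem_pos_col obtem_pos_lin
  dsimp only
  rw [pvOrd_chr _ h0 h10]
  rw [show 97 + (s - i) - 97 = s - i by ring, show i + 1 - 1 = i by ring]

lemma pvDiagUp_eq (t : List (List Int)) (d : Int) (k : Nat) :
    ∀ (i : Int) (acc : List ((String × Int) × Int)), (i + 1).toNat ≤ k →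
      pvDiagUp t k i (i + d) acc =
        (PySem.List.pyRange (max 0 (-d)) (max (max 0 (-d)) (i + 1)) 1).map (pvCellD t d) ++ acc := by
  induction k with
  | zero =>
    intro i acc hk
    rw [pvDiagUp]
    rw [show max (max 0 (-d)) (i+1) = max 0 (-d) by omega,
        PySem.List.pyRange_one_eq_nil le_rfl]
    simp
  | succ k ih =>
    intro i acc hk
    by_cases h : 0 ≤ i ∧ 0 ≤ i + d
    · rw [pvDiagUp, if_pos h]
      have e1 : i + d - 1 = (i - 1) + d := by ring
      rw [e1, ih (i-1) _ (by omega)]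
      rw [show max (max 0 (-d)) (i - 1 + 1) = max (max 0 (-d)) i by omega]
      rw [show max (max 0 (-d)) (i + 1) = i + 1 by omega,
          show max (max 0 (-d)) i = i by omega]
      rw [PySem.List.pyRange_one_succ_right (by omega)]
      simp [pvCellD]
    · rw [pvDiagUp, if_neg h]
      rw [show max (max 0 (-d)) (i+1) = max 0 (-d) by omega,
          PySem.List.pyRange_one_eq_nil le_rfl]
      simp

lemma pvDiagDown_eq (t : List (List Int)) (n d : Int) (k : Nat) :
    ∀ (i : Int) (acc : List ((String × Int) × Int)), (n - i).toNat ≤ k →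
      pvDiagDown t n k i (i + d) acc =
        acc ++ (PySem.List.pyRange i (max i (min n (n - d))) 1).map (pvCellD t d) := by
  induction k with
  | zero =>
    intro i acc hk
    rw [pvDiagDown]
    rw [show max i (min n (n - d)) = i by omega, PySem.List.pyRange_one_eq_nil le_rfl]
    simp
  | succ k ih =>
    intro i acc hk
    by_cases h : i < n ∧ i + d < n
    · rw [pvDiagDown, if_pos h]
      have e1 : i + d + 1 = (i + 1) + d := by ring
      rw [e1, ih (i+1) _ (by omega)]
      rw [show max (i + 1) (min n (n - d)) = min n (n - d) by omega,
          show max i (min n (n - d)) = min n (n - d) by omega]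
      rw [PySem.List.pyRange_one_cons (by omega : i < min n (n - d))]
      simp [pvCellD]
    · rw [pvDiagDown, if_neg h]
      rw [show max i (min n (n - d)) = i by omega, PySem.List.pyRange_one_eq_nil le_rfl]
      simp

lemma pvAntiUp_eq (t : List (List Int)) (n s : Int) (k : Nat) :
    ∀ (i : Int) (acc : List ((String × Int) × Int)), (i + 1).toNat ≤ k →
      pvAntiUp t n k i (s - i) acc =
        acc ++ ((PySem.List.pyRange (max 0 (s - n + 1)) (max (max 0 (s - n + 1)) (i + 1)) 1).map (pvCellA t s)).reverse := by
  induction k with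
  | zero =>
    intro i acc hk
    rw [pvAntiUp]
    rw [show max (max 0 (s - n + 1)) (i+1) = max 0 (s - n + 1) by omega,
        PySem.List.pyRange_one_eq_nil le_rfl]
    simp
  | succ k ih =>
    intro i acc hk
    by_cases h : 0 ≤ i ∧ s - i < n
    · rw [pvAntiUp, if_pos h]
      have e1 : s - i + 1 = s - (i - 1) := by ring
      rw [e1, ih (i-1) _ (by omega)]
      rw [show max (max 0 (s - n + 1)) (i - 1 + 1) = i by omega,
          show max (max 0 (s - n + 1)) (i + 1) = i + 1 by omega]
      rw [PySem.List.pyRange_one_succ_right (by omega)]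
      simp [pvCellA]
    · rw [pvAntiUp, if_neg h]
      rw [show max (max 0 (s - n + 1)) (i+1) = max 0 (s - n + 1) by omega,
          PySem.List.pyRange_one_eq_nil le_rfl]
      simp

lemma pvAntiDown_eq (t : List (List Int)) (n s : Int) (k : Nat) :
    ∀ (i : Int) (acc : List ((String × Int) × Int)), (n - i).toNat ≤ k →
      pvAntiDown t n k i (s - i) acc =
        ((PySem.List.pyRange i (max i (min n (s + 1))) 1).map (pvCellA t s)).reverse ++ acc := by
  induction k with
  | zero =>
    intro i acc hk
    rw [pvAntiDown]
    rw [show max i (min n (s + 1)) = i by omega, PySem.List.pyRange_one_eq_nil le_rfl]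
    simp
  | succ k ih =>
    intro i acc hk
    by_cases h : i < n ∧ 0 ≤ s - i
    · rw [pvAntiDown, if_pos h]
      have e1 : s - i - 1 = s - (i + 1) := by ring
      rw [e1, ih (i+1) _ (by omega)]
      rw [show max (i + 1) (min n (s + 1)) = min n (s + 1) by omega,
          show max i (min n (s + 1)) = min n (s + 1) by omega]
      rw [PySem.List.pyRange_one_cons (by omega : i < min n (s + 1))]
      simp [pvCellA]
    · rw [pvAntiDown, if_neg h]
      rw [show max i (min n (s + 1)) = i by omega, PySem.List.pyRange_one_eq_nil le_rfl]
      simp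

lemma filter_pyRange_interval (x y : Int) (k : Nat) :
    ∀ (a b : Int), (b - a).toNat ≤ k →
      (PySem.List.pyRange a b 1).filter (fun i => decide (x ≤ i ∧ i < y)) =
        PySem.List.pyRange (max a x) (min b y) 1 := by
  induction k with
  | zero =>
    intro a b hk
    rw [PySem.List.pyRange_one_eq_nil (by omega), PySem.List.pyRange_one_eq_nil (by omega)]
    rfl
  | succ k ih =>
    intro a b hk
    by_cases hab : a < b
    · rw [PySem.List.pyRange_one_cons hab, List.filter_cons]
      by_cases hx : x ≤ a ∧ a < y
      · rw [if_pos (by simpa using hx), ih (a+1) b (by omega)]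
        rw [show max (a+1) x = a + 1 by omega, show max a x = a by omega]
        rw [PySem.List.pyRange_one_cons (by omega : a < min b y)]
      · rw [if_neg (by simpa using hx), ih (a+1) b (by omega)]
        by_cases hax : a < x
        · rw [show max (a+1) x = max a x by omega]
        · rw [PySem.List.pyRange_one_eq_nil (by omega), PySem.List.pyRange_one_eq_nil (by omega)]
    · rw [PySem.List.pyRange_one_eq_nil (by omega), PySem.List.pyRange_one_eq_nil (by omega)]
      rfl

-- ===== VERDICT (by name: the statement is the Claim_ definition above) =====
theorem obtem_linhas_diagonais_spec : Claim_equal_obtem_linhas_diagonais := by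
  intro t p _hdom hpre
  unfold Pre_obtem_linhas_diagonais at hpre
  obtain ⟨_hlen1, hpre2⟩ := hpre
  unfold Spec_obtem_linhas_diagonais obtem_linhas_diagonais obtem_linhas_diagonais_alt obtem_pos_col obtem_pos_lin
  dsimp only
  set n : Int := (t.length : Int) with hn
  set c : Int := pvOrdStr p.1 - 97 with hcdef
  set l : Int := p.2 - 1 with hldef
  set d : Int := c - l with hddef
  set s : Int := c + l with hsdef
  obtain ⟨hcE, hW1, hW2, hW3, hW4⟩ := hpre2
  have e1 : l - c = -d := by omega
  rw [e1] at hW1 hcE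
  -- the four loop characterisations
  have hDU := pvDiagUp_eq t d (l + 1).toNat l [] le_rfl
  rw [show l + d = c by omega] at hDU
  have hDD := pvDiagDown_eq t n d (n - (l + 1)).toNat (l + 1)
    (pvDiagUp t (l + 1).toNat l c []) le_rfl
  rw [show l + 1 + d = c + 1 by omega] at hDD
  have hAU := pvAntiUp_eq t n s (l + 1).toNat l [] le_rfl
  rw [show s - l = c by omega] at hAU
  have hAD := pvAntiDown_eq t n s (n - (l + 1)).toNat (l + 1)
    (pvAntiUp t n (l + 1).toNat l c []) le_rfl
  rw [show s - (l + 1) = c - 1 by omega] at hAD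
  -- B's two folds, as maps over the filtered index windows
  have hBD : (PySem.List.pyRange 0 n 1).foldl
      (fun acc i => if 0 ≤ i + c - l ∧ i + c - l < n then
          acc ++ [((pvChr (97 + (i + c - l)), i + 1),
            ((PySem.List.pyGet? t i).getD []) |> (fun row => (PySem.List.pyGet? row (i + c - l)).getD 0))]
        else acc) [] =
      (PySem.List.pyRange (max 0 (-d)) (min n (n - d)) 1).map
        (fun i : Int => ((pvChr (97 + (i + c - l)), i + 1),
          (PySem.List.pyGet? ((PySem.List.pyGet? t i).getD []) (i + c - l)).getD 0)) := by
    have h := PySem.List.foldl_append_if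
      (p := fun i : Int => decide (0 ≤ i + c - l ∧ i + c - l < n))
      (f := fun i : Int => ((pvChr (97 + (i + c - l)), i + 1),
        (PySem.List.pyGet? ((PySem.List.pyGet? t i).getD []) (i + c - l)).getD 0))
      (l := PySem.List.pyRange 0 n 1) (acc := [])
    simp only [decide_eq_true_eq] at h
    rw [h, List.nil_append]
    rw [List.filter_congr (fun i _ => (decide_eq_decide).mpr (by omega :
          (0 ≤ i + c - l ∧ i + c - l < n) ↔ (l - c ≤ i ∧ i < n - c + l)))]
    rw [filter_pyRange_interval (l - c) (n - c + l) (n - 0).toNat 0 n le_rfl]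
    rw [show max 0 (l - c) = max 0 (-d) by omega, show min n (n - c + l) = min n (n - d) by omega]
  have hBA : (PySem.List.pyRange (n - 1) (-1) (-1)).foldl
      (fun acc i => if 0 ≤ c + l - i ∧ c + l - i < n then
          acc ++ [((pvChr (97 + (c + l - i)), i + 1),
            ((PySem.List.pyGet? t i).getD []) |> (fun row => (PySem.List.pyGet? row (c + l - i)).getD 0))]
        else acc) [] =
      ((PySem.List.pyRange (max 0 (s - n + 1)) (min n (s + 1)) 1).map
        (fun i : Int => ((pvChr (97 + (c + l - i)), i + 1),
          (PySem.List.pyGet? ((PySem.List.pyGet? t i).getD []) (c + l - i)).getD 0))).reverse := by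
    rw [PySem.List.pyRange_neg_one_eq_reverse,
        show (-1 : Int) + 1 = 0 by ring, show n - 1 + 1 = n by ring]
    have h := PySem.List.foldl_append_if
      (p := fun i : Int => decide (0 ≤ c + l - i ∧ c + l - i < n))
      (f := fun i : Int => ((pvChr (97 + (c + l - i)), i + 1),
        (PySem.List.pyGet? ((PySem.List.pyGet? t i).getD []) (c + l - i)).getD 0))
      (l := (PySem.List.pyRange 0 n 1).reverse) (acc := [])
    simp only [decide_eq_true_eq] at h
    rw [h, List.nil_append, List.filter_reverse, List.map_reverse]
    rw [List.filter_congr (fun i _ => (decide_eq_decide).mpr (by omega :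
          (0 ≤ c + l - i ∧ c + l - i < n) ↔ (s - n + 1 ≤ i ∧ i < s + 1)))]
    rw [filter_pyRange_interval (s - n + 1) (s + 1) (n - 0).toNat 0 n le_rfl]
  -- window dichotomy for the diagonal
  have hdiag : (max 0 (-d) ≤ l + 1 ∧ l + 1 ≤ min n (n - d)) ∨
      (l + 1 ≤ max 0 (-d) ∧ min n (n - d) ≤ l + 1) := by
    rcases hcE with hcn | hempty
    · by_cases h2 : max 0 (-d) ≤ l + 1
      · by_cases h3 : l + 1 ≤ min n (n - d)
        · exact Or.inl ⟨h2, h3⟩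
        · by_cases h4 : max 0 (-d) ≤ l
          · have hok := hW1 l (PySem.List.mem_pyRange_one.mpr ⟨h4, by omega⟩)
            unfold pvOkD at hok
            omega
          · exact Or.inr ⟨by omega, by omega⟩
      · by_cases h3 : l + 1 < min n (n - d)
        · have hok := hW2 (l + 1) (PySem.List.mem_pyRange_one.mpr ⟨le_rfl, by omega⟩)
          unfold pvOkD at hok
          omega
        · exact Or.inr ⟨by omega, by omega⟩
    · exact Or.inr ⟨hempty.1, hempty.2.1⟩
  -- window dichotomy for the antidiagonal
  have hanti : (max 0 (s - n + 1) ≤ l + 1 ∧ l + 1 ≤ min n (s + 1)) ∨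
      (l + 1 ≤ max 0 (s - n + 1) ∧ min n (s + 1) ≤ l + 1) := by
    rcases hcE with hcn | hempty
    · by_cases h2 : max 0 (s - n + 1) ≤ l + 1
      · by_cases h3 : l + 1 ≤ min n (s + 1)
        · exact Or.inl ⟨h2, h3⟩
        · by_cases h4 : max 0 (s - n + 1) ≤ l
          · have hok := hW3 l (PySem.List.mem_pyRange_one.mpr ⟨h4, by omega⟩)
            unfold pvOkA at hok
            omega
          · exact Or.inr ⟨by omega, by omega⟩
      · by_cases h3 : l + 1 < min n (s + 1)
        · have hok := hW4 (l + 1) (PySem.List.mem_pyRange_one.mpr ⟨le_rfl, by omega⟩)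
          unfold pvOkA at hok
          omega
        · exact Or.inr ⟨by omega, by omega⟩
    · exact Or.inr ⟨hempty.2.2.1, hempty.2.2.2⟩
  -- equate the diagonal components
  have hEqD : pvDiagDown t n (n - (l + 1)).toNat (l + 1) (c + 1)
        (pvDiagUp t (l + 1).toNat l c []) =
      (PySem.List.pyRange 0 n 1).foldl
        (fun acc i => if 0 ≤ i + c - l ∧ i + c - l < n then
            acc ++ [((pvChr (97 + (i + c - l)), i + 1),
              ((PySem.List.pyGet? t i).getD []) |> (fun row => (PySem.List.pyGet? row (i + c - l)).getD 0))]
          else acc) [] := by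
    rw [hBD]
    rcases hdiag with ⟨h2, h3⟩ | ⟨h2, h3⟩
    · rw [show max (max 0 (-d)) (l + 1) = l + 1 by omega] at hDU
      rw [show max (l + 1) (min n (n - d)) = min n (n - d) by omega] at hDD
      rw [hDD, hDU, List.append_nil, ← List.map_append,
          ← PySem.List.pyRange_one_append (max 0 (-d)) (l + 1) (min n (n - d)) h2 h3]
      refine List.map_congr_left ?_
      intro i hi
      rw [PySem.List.mem_pyRange_one] at hi
      have hok : pvOkD t d i := by
        by_cases h5 : i ≤ l
        · exact hW1 i (PySem.List.mem_pyRange_one.mpr ⟨hi.1, by omega⟩)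
        · exact hW2 i (PySem.List.mem_pyRange_one.mpr ⟨by omega, by omega⟩)
      unfold pvOkD at hok
      rw [pvCellD_eq t d i (by omega) (by omega), show i + d = i + c - l by omega]
    · rw [show max (max 0 (-d)) (l + 1) = max 0 (-d) by omega,
          PySem.List.pyRange_one_eq_nil le_rfl] at hDU
      rw [show max (l + 1) (min n (n - d)) = l + 1 by omega,
          PySem.List.pyRange_one_eq_nil le_rfl] at hDD
      rw [hDD, hDU, PySem.List.pyRange_one_eq_nil (by omega : min n (n - d) ≤ max 0 (-d))]
      simp
  -- equate the antidiagonal components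
  have hEqA : pvAntiDown t n (n - (l + 1)).toNat (l + 1) (c - 1)
        (pvAntiUp t n (l + 1).toNat l c []) =
      (PySem.List.pyRange (n - 1) (-1) (-1)).foldl
        (fun acc i => if 0 ≤ c + l - i ∧ c + l - i < n then
            acc ++ [((pvChr (97 + (c + l - i)), i + 1),
              ((PySem.List.pyGet? t i).getD []) |> (fun row => (PySem.List.pyGet? row (c + l - i)).getD 0))]
          else acc) [] := by
    rw [hBA]
    rcases hanti with ⟨h2, h3⟩ | ⟨h2, h3⟩
    · rw [show max (max 0 (s - n + 1)) (l + 1) = l + 1 by omega] at hAU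
      rw [show max (l + 1) (min n (s + 1)) = min n (s + 1) by omega] at hAD
      rw [hAD, hAU, List.nil_append, ← List.reverse_append, ← List.map_append,
          ← PySem.List.pyRange_one_append (max 0 (s - n + 1)) (l + 1) (min n (s + 1)) h2 h3]
      refine congrArg List.reverse (List.map_congr_left ?_)
      intro i hi
      rw [PySem.List.mem_pyRange_one] at hi
      have hok : pvOkA t s i := by
        by_cases h5 : i ≤ l
        · exact hW3 i (PySem.List.mem_pyRange_one.mpr ⟨hi.1, by omega⟩)
        · exact hW4 i (PySem.List.mem_pyRange_one.mpr ⟨by omega, by omega⟩)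
      unfold pvOkA at hok
      rw [pvCellA_eq t s i (by omega) (by omega), show s - i = c + l - i by omega]
    · rw [show max (max 0 (s - n + 1)) (l + 1) = max 0 (s - n + 1) by omega,
          PySem.List.pyRange_one_eq_nil le_rfl] at hAU
      rw [show max (l + 1) (min n (s + 1)) = l + 1 by omega,
          PySem.List.pyRange_one_eq_nil le_rfl] at hAD
      rw [hAD, hAU, PySem.List.pyRange_one_eq_nil (by omega : min n (s + 1) ≤ max 0 (s - n + 1))]
      simp
  rw [hEqD, hEqA]
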